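-- pv_equiv track=rewrite | github.com/MatthewBeaudouinLafon/computable-interface-schema | public/python-lib/parser.py | incrementally_aggregate
-- ===== SOURCE A (Python) =====
-- def incrementally_aggregate(array: list, symbol: str):
--     # Map an array to such that each term uses a combined sequence of the previous.
--     # For example, here using the `/` symbol.
--     # [a, b, c] => [a, a/b, a/b/c]
--     aggregate = []
--     for idx, term in enumerate(array):
--         if idx == 0:
--             aggregate.append(term)
--             continue
--
--         prev_aggregated_term = aggregate[idx - 1]
--         aggregated_term = prev_aggregated_term + symbol + term
--         aggregate.append(aggregated_term)
--     return aggregate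
-- ===== SOURCE B (Python) =====
-- def incrementally_aggregate(array: list, symbol: str):
--     # Accumulator-free: each output element is computed independently
--     # as the symbol-join of the prefix array[:i+1].
--     return [symbol.join(array[:i + 1]) for i in range(len(array))]
-- ===== Notes on version B (the rewrite author's own statement) =====
-- stated objective: simpler
-- what changed: Replaces the stateful loop that extends a running aggregate (reading aggregate[idx-1]) with a one-line comprehension computing each element independently as symbol.join(array[:i+1]).
import Mathlib
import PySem

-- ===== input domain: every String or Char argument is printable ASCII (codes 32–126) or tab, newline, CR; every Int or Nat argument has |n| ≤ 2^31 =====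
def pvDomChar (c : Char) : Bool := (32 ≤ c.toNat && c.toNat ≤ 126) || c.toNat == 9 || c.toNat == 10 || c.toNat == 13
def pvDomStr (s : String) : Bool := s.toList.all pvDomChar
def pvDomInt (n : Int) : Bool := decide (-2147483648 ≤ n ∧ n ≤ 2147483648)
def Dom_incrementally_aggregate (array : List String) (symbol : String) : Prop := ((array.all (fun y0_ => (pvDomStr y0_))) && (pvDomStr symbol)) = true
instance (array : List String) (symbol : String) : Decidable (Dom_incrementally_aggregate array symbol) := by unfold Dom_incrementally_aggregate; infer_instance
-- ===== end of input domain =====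

-- B replaces A's stateful accumulator loop by an accumulator-free comprehension:
-- each output element is recomputed independently as symbol.join(array[:i+1]).


-- ===== PORT A =====
-- literal port of A: fold over enumerate, reading aggregate[idx-1]
-- (that index is always in range when reached, so the .getD "" default is never used)
def incrementally_aggregate (array : List String) (symbol : String) : List String :=
  (PySem.List.enumerate array).foldl
    (fun aggregate it =>
      if it.1 == 0 then
        aggregate ++ [it.2]
      else
        let prev_aggregated_term := (PySem.List.pyGet? aggregate (it.1 - 1)).getD ""
        aggregate ++ [prev_aggregated_term ++ symbol ++ it.2])
    []

-- ===== PORT B =====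
-- literal port of B: [symbol.join(array[:i+1]) for i in range(len(array))]
def incrementally_aggregate_alt (array : List String) (symbol : String) : List String :=
  (List.range array.length).map
    (fun (i : Nat) => PySem.Str.join symbol (PySem.List.slice array none (some ((i : Int) + 1))))

-- ===== PRECONDITION & SPEC =====
def Spec_incrementally_aggregate (array : List String) (symbol : String) (out : List String) : Prop := out = incrementally_aggregate_alt array symbol
instance (array : List String) (symbol : String) (out : List String) : Decidable (Spec_incrementally_aggregate array symbol out) := by unfold Spec_incrementally_aggregate; infer_instance

-- ===== CLAIM (what is proved, stated in full; the proofs are below) =====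
def Claim_equal_incrementally_aggregate : Prop := ∀ (array : List String) (symbol : String), Dom_incrementally_aggregate array symbol → Spec_incrementally_aggregate array symbol (incrementally_aggregate array symbol)

-- ===== LEMMAS AND PROOFS =====

-- the common "extend by last ++ symbol ++ term" sequence both ports compute
def extSeq (symbol : String) : String → List String → List String
  | _, [] => []
  | last, t :: ts => (last ++ symbol ++ t) :: extSeq symbol (last ++ symbol ++ t) ts

theorem strJoin_singleton (sep x : String) : PySem.Str.join sep [x] = x := by
  simp [PySem.Str.join, PySem.Chars.join_singleton, String.ofList_toList]

theorem strJoin_cons_cons (sep x y : String) (l : List String) :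
    PySem.Str.join sep (x :: y :: l) = x ++ sep ++ PySem.Str.join sep (y :: l) := by
  simp [PySem.Str.join, PySem.Chars.join_cons_cons, String.ofList_append,
    String.ofList_toList, String.append_assoc]

theorem strJoin_snoc (sep t : String) (pre : List String) (h : pre ≠ []) :
    PySem.Str.join sep (pre ++ [t]) = PySem.Str.join sep pre ++ sep ++ t := by
  induction pre with
  | nil => exact absurd rfl h
  | cons a pre ih =>
    cases pre with
    | nil => simp [strJoin_cons_cons, strJoin_singleton]
    | cons b rest =>
      have : (a :: b :: rest) ++ [t] = a :: (b :: (rest ++ [t])) := by simp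
      rw [this, strJoin_cons_cons]
      have hb : (b :: (rest ++ [t])) = (b :: rest) ++ [t] := by simp
      rw [hb, ih (by simp), strJoin_cons_cons]
      simp [String.append_assoc]

theorem B_aux (sep : String) (xs : List String) :
    ∀ pre : List String, pre ≠ [] →
      (List.range xs.length).map
        (fun i => PySem.Str.join sep ((pre ++ xs).take (pre.length + (i + 1))))
        = extSeq sep (PySem.Str.join sep pre) xs := by
  induction xs with
  | nil => intro pre _; simp [extSeq]
  | cons t ts ih =>
    intro pre hpre
    have hsplit : pre ++ t :: ts = (pre ++ [t]) ++ ts := by simp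
    rw [List.length_cons, List.range_succ_eq_map, List.map_cons, List.map_map]
    have h0 : PySem.Str.join sep ((pre ++ t :: ts).take (pre.length + (0 + 1)))
        = PySem.Str.join sep pre ++ sep ++ t := by
      rw [hsplit]
      have : pre.length + (0 + 1) = (pre ++ [t]).length := by simp
      rw [this, List.take_left, strJoin_snoc sep t pre hpre]
    have htail : ((fun i => PySem.Str.join sep ((pre ++ t :: ts).take (pre.length + (i + 1)))) ∘ Nat.succ)
        = (fun i => PySem.Str.join sep (((pre ++ [t]) ++ ts).take ((pre ++ [t]).length + (i + 1)))) := by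
      funext i
      simp only [Function.comp, hsplit]
      congr 2
      simp
      omega
    rw [h0, htail, ih (pre ++ [t]) (by simp), strJoin_snoc sep t pre hpre]
    rfl

def stepA (sep : String) (aggregate : List String) (it : Int × String) : List String :=
  if it.1 == 0 then
    aggregate ++ [it.2]
  else
    let prev_aggregated_term := (PySem.List.pyGet? aggregate (it.1 - 1)).getD ""
    aggregate ++ [prev_aggregated_term ++ sep ++ it.2]

theorem A_loop (sep : String) (ts : List String) :
    ∀ (acc : List String) (last : String), acc ≠ [] → acc.getLast? = some last →
      (PySem.List.enumerate ts (acc.length : Int)).foldl (stepA sep) acc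
      = acc ++ extSeq sep last ts := by
  induction ts with
  | nil => intro acc last _ _; simp [PySem.List.enumerate_nil, extSeq]
  | cons t ts ih =>
    intro acc last hne hlast
    have hlen : 0 < acc.length := List.length_pos_of_ne_nil hne
    rw [PySem.List.enumerate_cons, List.foldl_cons]
    have hstep : stepA sep acc ((acc.length : Int), t) = acc ++ [last ++ sep ++ t] := by
      unfold stepA
      have hne0 : ((acc.length : Int) == 0) = false := by
        simp only [beq_eq_false_iff_ne, ne_eq]
        intro hc
        omega
      rw [hne0]
      simp only [if_false, Bool.false_eq_true]
      have hcast : (acc.length : Int) - 1 = ((acc.length - 1 : Nat) : Int) := by omega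
      rw [hcast, PySem.List.pyGet?_natCast]
      have : acc[acc.length - 1]? = some last := by
        rw [← List.getLast?_eq_getElem?]; exact hlast
      rw [this]
      rfl
    rw [hstep]
    have hlen2 : (acc.length : Int) + 1 = (((acc ++ [last ++ sep ++ t]).length : Nat) : Int) := by
      simp
    rw [hlen2, ih (acc ++ [last ++ sep ++ t]) (last ++ sep ++ t) (by simp)
      (by rw [List.getLast?_concat])]
    simp [extSeq]

theorem A_eq (x : String) (xs : List String) (sep : String) :
    incrementally_aggregate (x :: xs) sep = x :: extSeq sep x xs := by
  unfold incrementally_aggregate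
  have h0 : (fun (aggregate : List String) (it : Int × String) =>
      if it.1 == 0 then aggregate ++ [it.2]
      else
        let prev_aggregated_term := (PySem.List.pyGet? aggregate (it.1 - 1)).getD ""
        aggregate ++ [prev_aggregated_term ++ sep ++ it.2]) = stepA sep := by
    funext a it; rfl
  rw [h0, PySem.List.enumerate_cons, List.foldl_cons]
  have hfirst : stepA sep [] ((0 : Int), x) = [x] := by rfl
  rw [hfirst]
  have : (0 : Int) + 1 = (([x].length : Nat) : Int) := by simp
  rw [this, A_loop sep xs [x] x (by simp) (by simp)]
  rfl

theorem B_eq (x : String) (xs : List String) (sep : String) :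
    incrementally_aggregate_alt (x :: xs) sep = x :: extSeq sep x xs := by
  unfold incrementally_aggregate_alt
  have hslice : (fun (i : Nat) => PySem.Str.join sep (PySem.List.slice (x :: xs) none (some ((i : Int) + 1))))
      = (fun (i : Nat) => PySem.Str.join sep ((x :: xs).take (i + 1))) := by
    funext i
    have hc : ((i : Int) + 1) = (((i + 1 : Nat)) : Int) := by push_cast; ring
    rw [hc, PySem.List.slice_to_natCast]
  rw [hslice, List.length_cons, List.range_succ_eq_map, List.map_cons, List.map_map]
  have h0 : PySem.Str.join sep ((x :: xs).take (0 + 1)) = x := by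
    simp [strJoin_singleton]
  have htail : ((fun (i : Nat) => PySem.Str.join sep ((x :: xs).take (i + 1))) ∘ Nat.succ)
      = (fun (i : Nat) => PySem.Str.join sep ((([x] : List String) ++ xs).take (([x] : List String).length + (i + 1)))) := by
    funext i
    simp only [Function.comp]
    congr 2
    simp only [List.length_cons, List.length_nil]
    omega
  rw [h0, htail, B_aux sep xs [x] (by simp), strJoin_singleton]

-- ===== VERDICT (by name: the statement is the Claim_ definition above) =====
theorem incrementally_aggregate_spec : Claim_equal_incrementally_aggregate := by
  intro array symbol _
  unfold Spec_incrementally_aggregate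
  cases array with
  | nil => rfl
  | cons x xs => rw [A_eq, B_eq]
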